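-- pv_equiv track=rewrite | github.com/martintufte/rubiks-cube | rubiks_cube/move/__init__.py | invert_move
-- ===== SOURCE A (Python) =====
-- def invert_move(move: str) -> str:
--     """Invert a move.
--
--     Args:
--         move (str): Move to invert.
--
--     Returns:
--         str: Inverted move.
--     """
--     if move.startswith("("):
--         return "(" + invert_move(move[1:-1]) + ")"
--     if move.endswith("'"):
--         return move[:-1]
--     elif move.endswith("2"):
--         return move
--     return move + "'"
-- ===== SOURCE B (Python) =====
-- def invert_move(move: str) -> str:
--     """Invert a move (iterative: peel parentheses with a depth counter, then
--     transform the suffix of the core, then re-wrap)."""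
--     depth = 0
--     while move.startswith("("):
--         move = move[1:-1]
--         depth += 1
--     if move.endswith("'"):
--         core = move[:-1]
--     elif move.endswith("2"):
--         core = move
--     else:
--         core = move + "'"
--     return "(" * depth + core + ")" * depth
-- ===== Notes on version B (the rewrite author's own statement) =====
-- stated objective: alternative
-- what changed: Replaced the recursion with an iterative peel: a while loop strips one leading and one trailing character per opening parenthesis while counting depth, the core's suffix is transformed once, and the result is re-wrapped with depth pairs of parentheses.
import Mathlib
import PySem

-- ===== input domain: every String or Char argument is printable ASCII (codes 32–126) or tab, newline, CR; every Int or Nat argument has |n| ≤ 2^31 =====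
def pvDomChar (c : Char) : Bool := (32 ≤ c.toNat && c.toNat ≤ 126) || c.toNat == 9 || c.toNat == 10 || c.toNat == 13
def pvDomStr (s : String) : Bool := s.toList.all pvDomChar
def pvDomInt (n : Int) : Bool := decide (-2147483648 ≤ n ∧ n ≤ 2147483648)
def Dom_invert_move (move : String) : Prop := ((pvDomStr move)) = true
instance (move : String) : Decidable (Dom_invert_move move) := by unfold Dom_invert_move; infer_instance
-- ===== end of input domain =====

-- B replaces A's recursion by an iterative peel with a depth counter; same cost, no call stack.

-- termination measure for both ports: move[1:-1] is strictly shorter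
lemma pvCoreLenLt (cs : List Char) (h : cs.head? = some '(') :
    ((cs.drop 1).dropLast).length < cs.length := by
  cases cs with
  | nil => simp at h
  | cons a t =>
      simp only [List.drop_succ_cons, List.drop_zero, List.length_dropLast, List.length_cons]
      omega

-- ===== PORT A =====
-- A's recursion over the string; move[1:-1] on a nonempty string is exactly (drop 1).dropLast.
def invertMoveChars (cs : List Char) : List Char :=
  if h : cs.head? = some '(' then
    '(' :: invertMoveChars ((cs.drop 1).dropLast) ++ [')']
  else if cs.getLast? = some '\'' then cs.dropLast
  else if cs.getLast? = some '2' then cs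
  else cs ++ ['\'']
termination_by cs.length
decreasing_by exact pvCoreLenLt _ h

def invert_move (move : String) : String := String.ofList (invertMoveChars move.toList)

-- ===== PORT B =====
-- the while loop of Source B: take s[1:-1] while the string starts with an opening parenthesis, counting depth
def peelParens (cs : List Char) (d : Nat) : List Char × Nat :=
  if h : cs.head? = some '(' then peelParens ((cs.drop 1).dropLast) (d + 1)
  else (cs, d)
termination_by cs.length
decreasing_by exact pvCoreLenLt _ h

-- the suffix transformation of the core in Source B
def coreTransform (cs : List Char) : List Char :=
  if cs.getLast? = some '\'' then cs.dropLast
  else if cs.getLast? = some '2' then cs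
  else cs ++ ['\'']

def invert_move_alt (move : String) : String :=
  let p := peelParens move.toList 0
  String.ofList (List.replicate p.2 '(' ++ coreTransform p.1 ++ List.replicate p.2 ')')

-- ===== PRECONDITION & SPEC =====
def Spec_invert_move (move : String) (out : String) : Prop := out = invert_move_alt move
instance (move : String) (out : String) : Decidable (Spec_invert_move move out) := by unfold Spec_invert_move; infer_instance

-- ===== CLAIM (what is proved, stated in full; the proofs are below) =====
def Claim_equal_invert_move : Prop := ∀ (move : String), Dom_invert_move move → Spec_invert_move move (invert_move move)

-- ===== LEMMAS AND PROOFS =====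

lemma peelParens_acc : ∀ (n : Nat) (cs : List Char) (d : Nat), cs.length ≤ n →
    peelParens cs d = ((peelParens cs 0).1, (peelParens cs 0).2 + d) := by
  intro n
  induction n with
  | zero =>
      intro cs d hle
      have : cs = [] := List.length_eq_zero_iff.mp (Nat.le_zero.mp hle)
      subst this
      simp [peelParens]
  | succ n ih =>
      intro cs d hle
      by_cases h : cs.head? = some '('
      · have hlt := pvCoreLenLt cs h
        conv_lhs => rw [peelParens, dif_pos h]
        conv_rhs => rw [peelParens, dif_pos h]
        rw [ih _ (d + 1) (by omega), ih _ 1 (by omega)]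
        simp
        omega
      · conv_lhs => rw [peelParens, dif_neg h]
        conv_rhs => rw [peelParens, dif_neg h]
        simp

lemma invertMoveChars_eq : ∀ (n : Nat) (cs : List Char), cs.length ≤ n →
    invertMoveChars cs =
      List.replicate (peelParens cs 0).2 '(' ++ coreTransform (peelParens cs 0).1
        ++ List.replicate (peelParens cs 0).2 ')' := by
  intro n
  induction n with
  | zero =>
      intro cs hle
      have : cs = [] := List.length_eq_zero_iff.mp (Nat.le_zero.mp hle)
      subst this
      simp [invertMoveChars, peelParens, coreTransform]
  | succ n ih =>
      intro cs hle
      by_cases h : cs.head? = some '('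
      · have hlt := pvCoreLenLt cs h
        conv_lhs => rw [invertMoveChars, dif_pos h]
        conv_rhs => rw [peelParens, dif_pos h]
        rw [peelParens_acc ((cs.drop 1).dropLast).length _ 1 (le_refl _),
            ih _ (by omega)]
        simp [List.replicate_succ]
        rw [← List.replicate_succ', List.replicate_succ]
      · conv_lhs => rw [invertMoveChars, dif_neg h]
        conv_rhs => rw [peelParens, dif_neg h]
        simp [coreTransform]

theorem invert_move_eq_alt (move : String) : invert_move move = invert_move_alt move := by
  simp [invert_move, invert_move_alt,
    invertMoveChars_eq move.toList.length move.toList (le_refl _)]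

-- ===== VERDICT (by name: the statement is the Claim_ definition above) =====
theorem invert_move_spec : Claim_equal_invert_move := by
  intro move _
  exact invert_move_eq_alt move
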